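-- pv_equiv track=rewrite | github.com/alexa-infra/advent-of-code-2019 | day-16.py | calc
-- ===== SOURCE A (Python) =====
-- import itertools
-- import collections
--
-- base = [0, 1, 0, -1]
--
-- phase_cache = {}
--
-- def phase(n):
--     if n in phase_cache:
--         return phase_cache[n]
--     el = (itertools.repeat(x, n) for x in base)
--     p = list(itertools.chain(*el))
--     rv = p[1:] + [p[0]]
--     phase_cache[n] = rv
--     return rv
--
-- def phase_iter(data, n):
--     len_seq = n * 4
--     n_repeats = len(data) // len_seq
--     for i in range(n_repeats):
--         start = i * len_seq + (n - 1)
--         for j in range(n):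
--             yield data[start + j], 1
--         start = start + 2 * n
--         for j in range(n):
--             yield data[start + j], -1
--     rest = data[n_repeats * len_seq:]
--     for a, b in zip(rest, phase(n)):
--         if b == 0:
--             continue
--         yield a, b
--
-- def calc(idata, i):
--     #p = phase(i)
--
--     d = collections.defaultdict(int)
--     #for a, b in zip(idata, itertools.cycle(p)):
--     for a, b in phase_iter(idata, i):
--         if a == 0:
--             continue
--         if b == -1:
--             d[a] -= 1
--         elif b == 1:
--             d[a] += 1
--
--     s = sum(k * v for k, v in d.items())
--     return abs(s) % 10
-- ===== SOURCE B (Python) =====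
-- def calc(idata, i):
--     # Prefix sums: P[k] = sum of idata[:k].  The FFT pattern for output i is
--     # runs of i coefficients +1 starting at i-1, then -1 starting at 3*i-1,
--     # repeating with period 4*i; each run's contribution is one prefix-sum
--     # difference.
--     P = [0]
--     acc = 0
--     for x in idata:
--         acc += x
--         P.append(acc)
--     n = len(idata)
--     total = 0
--     start = i - 1
--     sign = 1
--     while start < n:
--         total += sign * (P[min(start + i, n)] - P[start])
--         start += 2 * i
--         sign = -sign
--     return abs(total) % 10
-- ===== Notes on version B (the rewrite author's own statement) =====
-- stated objective: faster
-- what changed: B replaces A's generated (value, +-1) pattern pairs and defaultdict tally by a prefix-sum array, adding one prefix-sum difference per +-1 run of the FFT pattern and skipping the zero runs entirely.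
import Mathlib
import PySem

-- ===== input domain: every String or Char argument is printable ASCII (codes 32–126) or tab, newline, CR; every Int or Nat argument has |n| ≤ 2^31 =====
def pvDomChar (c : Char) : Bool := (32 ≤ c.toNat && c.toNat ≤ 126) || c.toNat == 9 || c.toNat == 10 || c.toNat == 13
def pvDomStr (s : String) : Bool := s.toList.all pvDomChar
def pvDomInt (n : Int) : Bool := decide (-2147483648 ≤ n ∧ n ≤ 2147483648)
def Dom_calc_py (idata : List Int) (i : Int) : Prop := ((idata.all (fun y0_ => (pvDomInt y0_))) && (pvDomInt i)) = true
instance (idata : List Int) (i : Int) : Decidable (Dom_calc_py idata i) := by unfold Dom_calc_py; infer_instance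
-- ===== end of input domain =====

-- B replaces A's pattern generator + defaultdict counting by a prefix-sum array and one
-- prefix-difference per ±1 run of the FFT pattern (objective: faster by a constant factor).

-- ===== PORT A =====
def pvBase : List Int := [0, 1, 0, -1]

-- phase(n): itertools.repeat(x, n) repeats max(n,0) times; p[0] raises IndexError when
-- p = [] (n ≤ 0) — there `.headD 0` is junk, and those inputs are outside Pre_.
def pvPhase (n : Int) : List Int :=
  let p := pvBase.flatMap (fun x => List.replicate n.toNat x)
  p.drop 1 ++ [p.headD 0]

-- the body of calc's loop: skip a == 0, else count a with weight b (defaultdict(int))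
def pvStep (d : PySem.Dict Int Int) (ab : Int × Int) : PySem.Dict Int Int :=
  if ab.1 = 0 then d
  else if ab.2 = -1 then d.insert ab.1 (d.getD ab.1 0 - 1)
  else if ab.2 = 1 then d.insert ab.1 (d.getD ab.1 0 + 1)
  else d

-- one iteration of phase_iter's outer loop: the +1 run then the -1 run
-- (data[start+j] via pyGet?; `.getD 0` is junk only where Python would raise IndexError,
-- which cannot happen for i ≥ 1)
def pvBlock (data : List Int) (n s : Int) : List (Int × Int) :=
  ((PySem.List.pyRange 0 n 1).map (fun j => ((PySem.List.pyGet? data (s + j)).getD 0, (1 : Int))))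
    ++ ((PySem.List.pyRange 0 n 1).map (fun j => ((PySem.List.pyGet? data (s + 2 * n + j)).getD 0, (-1 : Int))))

-- phase_iter(data, n) as the list of yielded pairs; the `lenSeq = 0` guard marks where
-- Python raises ZeroDivisionError (outside Pre_)
def pvPhaseIter (data : List Int) (n : Int) : List (Int × Int) :=
  if n * 4 = 0 then []
  else
    ((PySem.List.pyRange 0 (PySem.Int.floordiv (data.length : Int) (n * 4)) 1).flatMap
        (fun k => pvBlock data n (k * (n * 4) + (n - 1))))
      ++ (((PySem.List.slice data
              (some ((PySem.Int.floordiv (data.length : Int) (n * 4)) * (n * 4))) none).zip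
            (pvPhase n)).filter (fun ab => ab.2 ≠ 0))

def calc_py (idata : List Int) (i : Int) : Int :=
  let d := (pvPhaseIter idata i).foldl pvStep PySem.Dict.empty
  let s := (d.items.map (fun kv => kv.1 * kv.2)).sum
  PySem.Int.mod |s| 10

-- ===== PORT B =====
-- the P.append(acc) loop: pvPrefix l acc lists the running sums acc+l[0], acc+l[0]+l[1], …
def pvPrefix : List Int → Int → List Int
  | [], _ => []
  | x :: t, acc => (acc + x) :: pvPrefix t (acc + x)

-- the while loop; the `0 < i` conjunct only makes the recursion total (Python's loop
-- does not terminate for i ≤ 0, which is outside Pre_)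
def pvLoopB (P : List Int) (n i : Int) (start sign total : Int) : Int :=
  if h : start < n ∧ 0 < i then
    pvLoopB P n i (start + 2 * i) (-sign)
      (total + sign * ((PySem.List.pyGet? P (min (start + i) n)).getD 0
                        - (PySem.List.pyGet? P start).getD 0))
  else total
termination_by (n - start).toNat
decreasing_by omega

def calc_py_alt (idata : List Int) (i : Int) : Int :=
  let P := 0 :: pvPrefix idata 0
  let n := (idata.length : Int)
  PySem.Int.mod |pvLoopB P n i (i - 1) 1 0| 10

-- ===== PRECONDITION & SPEC =====
-- Pre_ excludes i ≤ 0, where Python raises (ZeroDivisionError for i = 0 from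
-- len(data) // (4*i), IndexError p[0] inside phase(i) for i < 0).
def Pre_calc_py (idata : List Int) (i : Int) : Prop := 1 ≤ i
instance (idata : List Int) (i : Int) : Decidable (Pre_calc_py idata i) := by
  unfold Pre_calc_py; infer_instance

def pvWitness_calc_py : List Int × Int := ([1, 2, 3, 4, 5, 6, 7, 8], 2)

def Spec_calc_py (idata : List Int) (i : Int) (out : Int) : Prop := out = calc_py_alt idata i
instance (idata : List Int) (i : Int) (out : Int) : Decidable (Spec_calc_py idata i out) := by
  unfold Spec_calc_py; infer_instance

-- ===== CLAIM (what is proved, stated in full; the proofs are below) =====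
def Claim_equal_calc_py : Prop := ∀ (idata : List Int) (i : Int), Dom_calc_py idata i →
  Pre_calc_py idata i → Spec_calc_py idata i (calc_py idata i)

-- ===== LEMMAS AND PROOFS =====

-- the weight a pair (a, b) contributes to calc's final sum
def pvW (a b : Int) : Int :=
  if a = 0 then 0 else if b = -1 then -a else if b = 1 then a else 0

def pvWSum (l : List (Int × Int)) : Int := (l.map (fun ab => pvW ab.1 ab.2)).sum

def pvISum (l : List (Int × Int)) : Int := (l.map (fun kv => kv.1 * kv.2)).sum

-- clipped segment sum: Σ_{a ≤ j < b, j < len} l[j]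
def pvSeg (l : List Int) (a b : Int) : Int := ((l.drop a.toNat).take (b - a).toNat).sum

-- alternating run sums from `start`: seg(start, start+i) − seg(start+2i, start+3i) + …
def pvRunsum (l : List Int) (i start : Int) : Int :=
  if h : start < (l.length : Int) ∧ 0 < i then
    pvSeg l start (start + i) - pvRunsum l i (start + 2 * i)
  else 0
termination_by ((l.length : Int) - start).toNat
decreasing_by omega

@[simp] lemma pvW_one (a : Int) : pvW a 1 = a := by
  unfold pvW; split_ifs with h <;> simp [h] at * <;> omega

@[simp] lemma pvW_neg_one (a : Int) : pvW a (-1) = -a := by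
  unfold pvW; split_ifs with h <;> simp [h] at *

@[simp] lemma pvW_zero (a : Int) : pvW a 0 = 0 := by unfold pvW; split_ifs <;> simp_all

@[simp] lemma pvWSum_nil : pvWSum [] = 0 := rfl

@[simp] lemma pvWSum_cons (ab : Int × Int) (t : List (Int × Int)) :
    pvWSum (ab :: t) = pvW ab.1 ab.2 + pvWSum t := by simp [pvWSum]

@[simp] lemma pvWSum_append (l₁ l₂ : List (Int × Int)) :
    pvWSum (l₁ ++ l₂) = pvWSum l₁ + pvWSum l₂ := by simp [pvWSum]

lemma pvWSum_filter (l : List (Int × Int)) :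
    pvWSum (l.filter (fun ab => ab.2 ≠ 0)) = pvWSum l := by
  induction l with
  | nil => rfl
  | cons ab t ih =>
    rcases eq_or_ne ab.2 0 with h | h
    · rw [List.filter_cons_of_neg (by simp [h]), ih, pvWSum_cons, h, pvW_zero, zero_add]
    · rw [List.filter_cons_of_pos (by simp [h]), pvWSum_cons, pvWSum_cons, ih]


-- ---- segment-sum basics ----

lemma pvSeg_zero_left (l : List Int) (a b : Int) (h : (l.length : Int) ≤ a) :
    pvSeg l a b = 0 := by
  unfold pvSeg
  rw [List.drop_eq_nil_of_le (by omega)]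
  simp

lemma sum_take_sub (l : List Int) (a b : Nat) (hab : a ≤ b) :
    (l.take b).sum - (l.take a).sum = ((l.drop a).take (b - a)).sum := by
  conv_lhs => rw [show b = a + (b - a) by omega, List.take_add, List.sum_append]
  ring

-- ---- B side: the prefix list and the while loop ----

lemma pvPrefix_get (l : List Int) (acc : Int) (j : Nat) (hj : j < l.length) :
    (pvPrefix l acc)[j]? = some (acc + (l.take (j + 1)).sum) := by
  induction l generalizing acc j with
  | nil => simp at hj
  | cons x t ih =>
    cases j with
    | zero => simp [pvPrefix]
    | succ j =>
      simp only [pvPrefix, List.getElem?_cons_succ]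
      rw [ih (acc := acc + x) (hj := by simpa using hj)]
      simp [List.take_succ_cons, add_assoc]

lemma pvP_get (l : List Int) (v : Int) (h0 : 0 ≤ v) (h : v ≤ (l.length : Int)) :
    (PySem.List.pyGet? (0 :: pvPrefix l 0) v).getD 0 = (l.take v.toNat).sum := by
  rw [PySem.List.pyGet?_of_nonneg _ h0]
  rcases hv : v.toNat with _ | j
  · simp
  · rw [List.getElem?_cons_succ, pvPrefix_get l 0 j (by omega)]
    simp

lemma take_sub_eq_pvSeg (l : List Int) (start i : Int) (h0 : 0 ≤ start) (hi : 0 < i)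
    (hs : start ≤ (l.length : Int)) :
    (l.take (min (start + i) (l.length : Int)).toNat).sum - (l.take start.toNat).sum
      = pvSeg l start (start + i) := by
  unfold pvSeg
  rw [sum_take_sub l start.toNat _ (by omega)]
  rcases le_or_gt (start + i) (l.length : Int) with hle | hlt
  · rw [min_eq_left hle, show (start + i - start).toNat = (start + i).toNat - start.toNat
      by omega]
  · rw [min_eq_right (by omega)]
    have t1 : (l.drop start.toNat).take ((l.length : Int).toNat - start.toNat)
        = l.drop start.toNat := List.take_of_length_le (by simp only [List.length_drop]; omega)
    have t2 : (l.drop start.toNat).take ((start + i - start).toNat)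
        = l.drop start.toNat := List.take_of_length_le (by simp only [List.length_drop]; omega)
    rw [t1, t2]

lemma pvLoopB_eq (l : List Int) (i : Int) (hi : 0 < i) :
    ∀ (k : Nat) (start : Int), ((l.length : Int) - start).toNat ≤ k → 0 ≤ start →
    ∀ sign total,
    pvLoopB (0 :: pvPrefix l 0) (l.length : Int) i start sign total
      = total + sign * pvRunsum l i start := by
  intro k
  induction k with
  | zero =>
    intro start hk h0 sign total
    rw [pvLoopB, dif_neg (by omega), pvRunsum, dif_neg (by omega)]
    ring
  | succ k ih =>
    intro start hk h0 sign total
    by_cases hlt : start < (l.length : Int)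
    · have hru : pvRunsum l i start
          = pvSeg l start (start + i) - pvRunsum l i (start + 2 * i) := by
        rw [pvRunsum, dif_pos ⟨hlt, hi⟩]
      rw [pvLoopB, dif_pos ⟨hlt, hi⟩, ih (start + 2 * i) (by omega) (by omega), hru,
        pvP_get l _ (by omega) (by omega), pvP_get l start h0 (by omega),
        take_sub_eq_pvSeg l start i h0 hi (by omega)]
      ring
    · rw [pvLoopB, dif_neg (by omega), pvRunsum, dif_neg (by omega)]
      ring

-- ---- A side: the value sum of one pattern block ----

lemma sum_pyRange_get (l : List Int) (s : Int) (m : Nat) (h0 : 0 ≤ s)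
    (h : s.toNat + m ≤ l.length) :
    ((PySem.List.pyRange 0 (m : Int) 1).map
      (fun j => (PySem.List.pyGet? l (s + j)).getD 0)).sum
      = ((l.drop s.toNat).take m).sum := by
  induction m with
  | zero => simp [PySem.List.pyRange_one_eq_nil le_rfl]
  | succ m ih =>
    rw [show ((m + 1 : Nat) : Int) = (m : Int) + 1 by push_cast; ring,
      PySem.List.pyRange_one_succ_right (by positivity), List.map_append, List.sum_append,
      ih (by omega), List.take_succ]
    simp only [List.map_cons, List.map_nil, List.sum_cons, List.sum_nil]
    rw [PySem.List.pyGet?_of_nonneg _ (by omega), List.getElem?_drop,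
      List.getElem?_eq_getElem (by omega), List.getElem?_eq_getElem (by omega)]
    simp only [Option.getD_some, Option.toList_some, List.sum_append, List.sum_cons,
      List.sum_nil]
    have : (s + (m : Int)).toNat = s.toNat + m := by omega
    simp [this]

lemma sum_pyRange_get' (l : List Int) (s cnt : Int) (h0 : 0 ≤ s) (hcnt : 0 ≤ cnt)
    (h : s.toNat + cnt.toNat ≤ l.length) :
    ((PySem.List.pyRange 0 cnt 1).map
      (fun j => (PySem.List.pyGet? l (s + j)).getD 0)).sum
      = ((l.drop s.toNat).take cnt.toNat).sum := by
  obtain ⟨m, hm⟩ : ∃ m : Nat, cnt = (m : Int) := ⟨cnt.toNat, by omega⟩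
  subst hm
  simp only [Int.toNat_natCast] at h ⊢
  exact sum_pyRange_get l s m h0 h

lemma pvWSum_map_one (r : List Int) (f : Int → Int) :
    pvWSum (r.map (fun j => (f j, (1 : Int)))) = (r.map f).sum := by
  simp [pvWSum, List.map_map, Function.comp_def]

lemma pvWSum_map_neg_one (r : List Int) (f : Int → Int) :
    pvWSum (r.map (fun j => (f j, (-1 : Int)))) = -(r.map f).sum := by
  induction r with
  | nil => simp [pvWSum]
  | cons x t ih => simp only [List.map_cons, pvWSum_cons, List.sum_cons, ih, pvW_neg_one]; ring

lemma pvBlock_sum (l : List Int) (i s : Int) (hi : 1 ≤ i) (h0 : 0 ≤ s)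
    (h : s + 3 * i ≤ (l.length : Int)) :
    pvWSum (pvBlock l i s) = pvSeg l s (s + i) - pvSeg l (s + 2 * i) (s + 2 * i + i) := by
  unfold pvBlock
  rw [pvWSum_append, pvWSum_map_one, pvWSum_map_neg_one,
    sum_pyRange_get' l s i (by omega) (by omega) (by omega),
    sum_pyRange_get' l (s + 2 * i) i (by omega) (by omega) (by omega)]
  unfold pvSeg
  have e1 : (s + i - s).toNat = i.toNat := by omega
  have e2 : (s + 2 * i + i - (s + 2 * i)).toNat = i.toNat := by omega
  rw [e1, e2]
  ring

-- ---- A side: the tail (zip with phase(i)) ----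

lemma pvPhase_eq (i : Int) (hi : 1 ≤ i) :
    pvPhase i = List.replicate (i.toNat - 1) 0
      ++ (List.replicate i.toNat 1
      ++ (List.replicate i.toNat 0 ++ (List.replicate i.toNat (-1) ++ [0]))) := by
  obtain ⟨m, hm⟩ : ∃ m, i.toNat = m + 1 := ⟨i.toNat - 1, by omega⟩
  unfold pvPhase pvBase
  simp only [List.flatMap_cons, List.flatMap_nil, List.append_nil, hm,
    List.replicate_succ]
  simp

lemma zip_repl_zero (l : List Int) (k : Nat) (rest : List Int) :
    pvWSum (l.zip (List.replicate k 0 ++ rest)) = pvWSum ((l.drop k).zip rest) := by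
  induction k generalizing l with
  | zero => simp
  | succ k ih =>
    cases l with
    | nil => simp [pvWSum]
    | cons x t => simp only [List.replicate_succ, List.cons_append, List.zip_cons_cons,
        pvWSum_cons, pvW_zero, List.drop_succ_cons, ih, zero_add]

lemma zip_repl_one (l : List Int) (k : Nat) (rest : List Int) :
    pvWSum (l.zip (List.replicate k 1 ++ rest))
      = (l.take k).sum + pvWSum ((l.drop k).zip rest) := by
  induction k generalizing l with
  | zero => simp
  | succ k ih =>
    cases l with
    | nil => simp [pvWSum]
    | cons x t =>
      simp only [List.replicate_succ, List.cons_append, List.zip_cons_cons, pvWSum_cons,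
        pvW_one, List.drop_succ_cons, List.take_succ_cons, List.sum_cons, ih]
      ring

lemma zip_repl_neg_one (l : List Int) (k : Nat) (rest : List Int) :
    pvWSum (l.zip (List.replicate k (-1) ++ rest))
      = -(l.take k).sum + pvWSum ((l.drop k).zip rest) := by
  induction k generalizing l with
  | zero => simp
  | succ k ih =>
    cases l with
    | nil => simp [pvWSum]
    | cons x t =>
      simp only [List.replicate_succ, List.cons_append, List.zip_cons_cons, pvWSum_cons,
        pvW_neg_one, List.drop_succ_cons, List.take_succ_cons, List.sum_cons, ih]
      ring

lemma zip_single_zero (l : List Int) : pvWSum (l.zip [(0 : Int)]) = 0 := by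
  cases l <;> simp [pvWSum]

lemma pvTail_sum (l : List Int) (i : Int) (hi : 1 ≤ i) :
    pvWSum ((l.zip (pvPhase i)).filter (fun ab => ab.2 ≠ 0))
      = pvSeg l (i - 1) (i - 1 + i) - pvSeg l (i - 1 + 2 * i) (i - 1 + 2 * i + i) := by
  rw [pvWSum_filter, pvPhase_eq i hi, zip_repl_zero, zip_repl_one, zip_repl_zero,
    zip_repl_neg_one, zip_single_zero, List.drop_drop, List.drop_drop]
  unfold pvSeg
  have e1 : (i - 1).toNat = i.toNat - 1 := by omega
  have e2 : (i - 1 + i - (i - 1)).toNat = i.toNat := by omega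
  have e3 : (i - 1 + 2 * i).toNat = i.toNat + (i.toNat + (i.toNat - 1)) := by omega
  have e4 : (i - 1 + 2 * i + i - (i - 1 + 2 * i)).toNat = i.toNat := by omega
  rw [e1, e2, e3, e4]
  ring

-- ---- runsum: small case and 4i-shift ----

lemma pvRunsum_small (l : List Int) (i : Int) (hi : 1 ≤ i) (h : (l.length : Int) < 4 * i) :
    pvRunsum l i (i - 1)
      = pvSeg l (i - 1) (i - 1 + i) - pvSeg l (i - 1 + 2 * i) (i - 1 + 2 * i + i) := by
  by_cases h1 : i - 1 < (l.length : Int)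
  · rw [pvRunsum, dif_pos ⟨h1, by omega⟩]
    by_cases h2 : i - 1 + 2 * i < (l.length : Int)
    · rw [pvRunsum, dif_pos ⟨h2, by omega⟩, pvRunsum, dif_neg (by omega)]
      try ring
    · rw [pvRunsum, dif_neg (by omega), pvSeg_zero_left l (i - 1 + 2 * i) _ (by omega)]
      try ring
  · rw [pvRunsum, dif_neg (by omega), pvSeg_zero_left l (i - 1) _ (by omega),
      pvSeg_zero_left l (i - 1 + 2 * i) _ (by omega)]
    try ring

lemma pvSeg_drop (l : List Int) (c : Nat) (a b : Int) (ha : 0 ≤ a) :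
    pvSeg l ((c : Int) + a) ((c : Int) + b) = pvSeg (l.drop c) a b := by
  unfold pvSeg
  rw [List.drop_drop]
  have e1 : ((c : Int) + a).toNat = c + a.toNat := by omega
  have e2 : ((c : Int) + b - ((c : Int) + a)).toNat = (b - a).toNat := by omega
  rw [e1, e2]

lemma pvRunsum_shift (l : List Int) (i : Int) (hi : 0 < i) :
    ∀ (k : Nat) (s : Int), ((l.length : Int) - s).toNat ≤ k → 0 ≤ s →
    pvRunsum l i (4 * i + s) = pvRunsum (l.drop (4 * i).toNat) i s := by
  intro k
  induction k with
  | zero =>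
    intro s hk h0
    rw [pvRunsum, dif_neg (by omega), pvRunsum, dif_neg (by simp [List.length_drop]; omega)]
  | succ k ih =>
    intro s hk h0
    by_cases hlt : 4 * i + s < (l.length : Int)
    · have h1 : pvRunsum l i (4 * i + s)
          = pvSeg l (4 * i + s) (4 * i + s + i) - pvRunsum l i (4 * i + s + 2 * i) := by
        rw [pvRunsum, dif_pos ⟨hlt, hi⟩]
      have h2 : pvRunsum (l.drop (4 * i).toNat) i s
          = pvSeg (l.drop (4 * i).toNat) s (s + i)
            - pvRunsum (l.drop (4 * i).toNat) i (s + 2 * i) := by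
        rw [pvRunsum, dif_pos ⟨by simp [List.length_drop]; omega, hi⟩]
      have hseg : pvSeg l (4 * i + s) (4 * i + s + i)
          = pvSeg (l.drop (4 * i).toNat) s (s + i) := by
        have h3 := pvSeg_drop l (4 * i).toNat s (s + i) h0
        rw [show (((4 * i).toNat : Nat) : Int) = 4 * i by omega] at h3
        rw [show 4 * i + s + i = 4 * i + (s + i) by ring]
        exact h3
      have e : 4 * i + s + 2 * i = 4 * i + (s + 2 * i) := by ring
      rw [h1, h2, hseg, e, ih (s + 2 * i) (by omega) (by omega)]
    · rw [pvRunsum, dif_neg (by omega), pvRunsum,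
        dif_neg (by simp [List.length_drop]; omega)]

-- ---- A side main lemma: pvPhaseIter sums to pvRunsum ----

lemma pyGet?_drop_shift (l : List Int) (c : Nat) (x : Int) (hx : 0 ≤ x) :
    PySem.List.pyGet? (l.drop c) x = PySem.List.pyGet? l ((c : Int) + x) := by
  rw [PySem.List.pyGet?_of_nonneg _ hx, PySem.List.pyGet?_of_nonneg _ (by omega),
    List.getElem?_drop]
  congr 1
  omega

lemma pvBlock_shift (l : List Int) (i s : Int) (hi : 0 < i) (hs : 0 ≤ s) :
    pvBlock l i (4 * i + s) = pvBlock (l.drop (4 * i).toNat) i s := by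
  unfold pvBlock
  congr 1
  · apply List.map_congr_left
    intro j hj
    have hj' := (PySem.List.mem_pyRange_one.mp hj).1
    rw [pyGet?_drop_shift l _ (s + j) (by omega),
      show ((((4 * i).toNat : Nat) : Int) + (s + j)) = 4 * i + s + j by omega]
  · apply List.map_congr_left
    intro j hj
    have hj' := (PySem.List.mem_pyRange_one.mp hj).1
    rw [pyGet?_drop_shift l _ (s + 2 * i + j) (by omega),
      show ((((4 * i).toNat : Nat) : Int) + (s + 2 * i + j)) = 4 * i + s + 2 * i + j
      by omega]

lemma pvPhaseIter_small (l : List Int) (i : Int) (hi : 1 ≤ i)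
    (h : (l.length : Int) < 4 * i) :
    pvWSum (pvPhaseIter l i) = pvRunsum l i (i - 1) := by
  have hr : PySem.Int.floordiv (l.length : Int) (i * 4) = 0 :=
    (PySem.Int.floordiv_eq_iff_of_pos (by omega)).mpr ⟨by simp, by simp; omega⟩
  unfold pvPhaseIter
  simp only [hr, if_neg (show ¬ (i * 4 = 0) by omega), PySem.List.pyRange_one_eq_nil le_rfl,
    List.flatMap_nil, List.nil_append, zero_mul]
  rw [show PySem.List.slice l (some 0) none = l by
    rw [PySem.List.slice_from l (by omega)]; simp]
  rw [pvTail_sum l i hi, pvRunsum_small l i hi h]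

lemma pvPhaseIter_step (l : List Int) (i : Int) (hi : 1 ≤ i)
    (h : 4 * i ≤ (l.length : Int)) :
    pvPhaseIter l i = pvBlock l i (i - 1) ++ pvPhaseIter (l.drop (4 * i).toNat) i := by
  have hne : ¬ (i * 4 = 0) := by omega
  have hpos : (0 : Int) < i * 4 := by omega
  set r := PySem.Int.floordiv (l.length : Int) (i * 4) with hrdef
  obtain ⟨hr1, hr2⟩ := (PySem.Int.floordiv_eq_iff_of_pos hpos).mp hrdef.symm
  have hr0 : 1 ≤ r := by
    rw [hrdef]
    exact (PySem.Int.le_floordiv_iff_mul_le hpos).mpr (by rw [one_mul]; omega)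
  have hX4 : i * 4 ≤ r * (i * 4) := le_mul_of_one_le_left (le_of_lt hpos) hr0
  have hlen' : ((l.drop (4 * i).toNat).length : Int) = (l.length : Int) - 4 * i := by
    simp only [List.length_drop]; omega
  have hr' : PySem.Int.floordiv ((l.drop (4 * i).toNat).length : Int) (i * 4) = r - 1 := by
    rw [hlen']
    refine (PySem.Int.floordiv_eq_iff_of_pos hpos).mpr ⟨?_, ?_⟩
    · have e : (r - 1) * (i * 4) = r * (i * 4) - i * 4 := by ring
      rw [e]; linarith [hr1]
    · have e : (r - 1 + 1) * (i * 4) = r * (i * 4) := by ring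
      rw [e]; linarith [hr2]
  unfold pvPhaseIter
  rw [if_neg hne, if_neg hne, hr', ← hrdef,
    PySem.List.pyRange_one_cons (show (0 : Int) < r by omega), List.flatMap_cons,
    show (0 : Int) * (i * 4) + (i - 1) = i - 1 by ring, List.append_assoc]
  congr 1
  congr 1
  -- the remaining full blocks, reindexed over the dropped list
  · rw [show (0 : Int) + 1 = 1 by ring, PySem.List.pyRange_one 1 r,
      PySem.List.pyRange_one 0 (r - 1),
      show r - 1 - 0 = r - 1 by ring, List.flatMap_map, List.flatMap_map]
    congr 1
    funext k
    have hk0 : (0 : Int) ≤ (k : Int) * (i * 4) + (i - 1) := by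
      have := mul_nonneg (Int.natCast_nonneg k) (le_of_lt hpos)
      omega
    show pvBlock l i ((1 + (k : Int)) * (i * 4) + (i - 1))
      = pvBlock (l.drop (4 * i).toNat) i ((0 + (k : Int)) * (i * 4) + (i - 1))
    rw [show (1 + (k : Int)) * (i * 4) + (i - 1)
        = 4 * i + ((k : Int) * (i * 4) + (i - 1)) by ring,
      show (0 + (k : Int)) * (i * 4) + (i - 1) = (k : Int) * (i * 4) + (i - 1) by ring,
      pvBlock_shift l i _ (by omega) hk0]
  -- the tail: the two rest slices are the same list
  · have hsl : PySem.List.slice l (some (r * (i * 4))) none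
        = PySem.List.slice (l.drop (4 * i).toNat) (some ((r - 1) * (i * 4))) none := by
      rw [PySem.List.slice_from l (by omega), PySem.List.slice_from _ (by linarith [hX4]),
        List.drop_drop]
      congr 1
      have e : (r - 1) * (i * 4) = r * (i * 4) - i * 4 := by ring
      generalize hXg : r * (i * 4) = X at e hX4 ⊢
      omega
    rw [hsl]

lemma pvPhaseIter_sum (i : Int) (hi : 1 ≤ i) :
    ∀ (N : Nat) (l : List Int), l.length ≤ N →
    pvWSum (pvPhaseIter l i) = pvRunsum l i (i - 1) := by
  intro N
  induction N with
  | zero =>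
    intro l hl
    exact pvPhaseIter_small l i hi (by omega)
  | succ N ih =>
    intro l hl
    by_cases hsm : (l.length : Int) < 4 * i
    · exact pvPhaseIter_small l i hi hsm
    · have h1 : pvRunsum l i (i - 1)
          = pvSeg l (i - 1) (i - 1 + i) - pvRunsum l i (i - 1 + 2 * i) := by
        rw [pvRunsum, dif_pos ⟨by omega, by omega⟩]
      have h2 : pvRunsum l i (i - 1 + 2 * i)
          = pvSeg l (i - 1 + 2 * i) (i - 1 + 2 * i + i)
            - pvRunsum l i (i - 1 + 2 * i + 2 * i) := by
        rw [pvRunsum, dif_pos ⟨by omega, by omega⟩]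
      have e : i - 1 + 2 * i + 2 * i = 4 * i + (i - 1) := by ring
      rw [pvPhaseIter_step l i hi (by omega), pvWSum_append,
        ih (l.drop (4 * i).toNat) (by simp [List.length_drop]; omega),
        pvBlock_sum l i (i - 1) hi (by omega) (by omega), h1, h2, e,
        pvRunsum_shift l i (by omega) ((l.length : Int) - (i - 1)).toNat (i - 1)
        le_rfl (by omega)]
      ring

-- ---- the dict: its item sum is the weighted sum of the pairs fed to it ----

@[simp] lemma pvISum_nil : pvISum [] = 0 := rfl

@[simp] lemma pvISum_cons (p : Int × Int) (t : List (Int × Int)) :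
    pvISum (p :: t) = p.1 * p.2 + pvISum t := by simp [pvISum]

@[simp] lemma pvISum_append (l₁ l₂ : List (Int × Int)) :
    pvISum (l₁ ++ l₂) = pvISum l₁ + pvISum l₂ := by simp [pvISum]

lemma pvISum_replace :
    ∀ (t : List (Int × Int)) (k v c : Int), (t.map Prod.fst).Nodup → (k, v) ∈ t →
    pvISum (t.map (fun p => if p.1 == k then (k, v + c) else p)) = pvISum t + k * c := by
  intro t
  induction t with
  | nil => intro k v c _ hm; simp at hm
  | cons q t ih =>
    intro k v c hnd hm
    simp only [List.map_cons, List.nodup_cons] at hnd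
    by_cases hqk : q.1 = k
    · have hq : q = (k, v) := by
        rcases List.mem_cons.mp hm with h | h
        · exact h.symm
        · exact absurd (List.mem_map.mpr ⟨(k, v), h, rfl⟩) (hqk ▸ hnd.1)
      subst hq
      rw [List.map_cons, if_pos (by simp)]
      have htail : t.map (fun p => if p.1 == k then (k, v + c) else p) = t := by
        have := List.map_congr_left (f := fun p : Int × Int =>
            if p.1 == k then (k, v + c) else p) (g := id) (l := t) ?_
        · simpa using this
        · intro p hp
          have hp1 : p.1 ≠ k := fun e =>
            hnd.1 (by rw [hqk]; exact e ▸ List.mem_map.mpr ⟨p, hp, rfl⟩)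
          simp [hp1]
      rw [htail, pvISum_cons, pvISum_cons]
      ring
    · have hm' : (k, v) ∈ t := by
        rcases List.mem_cons.mp hm with h | h
        · exact absurd (congrArg Prod.fst h.symm) hqk
        · exact h
      rw [List.map_cons, if_neg (by simp [hqk]), pvISum_cons, pvISum_cons,
        ih k v c hnd.2 hm']
      ring

lemma pvISum_insert (d : PySem.Dict Int Int) (hnd : d.keys.Nodup) (k c : Int) :
    pvISum ((d.insert k (d.getD k 0 + c)).items) = pvISum d.items + k * c := by
  by_cases hc : d.contains k = true
  · obtain ⟨v, hmem⟩ : ∃ x, (k, x) ∈ d.items := by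
      simpa [PySem.Dict.keys] using (PySem.Dict.contains_iff_mem_keys d k).mp hc
    have hg : d.getD k 0 = v := PySem.Dict.getD_of_mem_items d hmem hnd 0
    rw [PySem.Dict.items_insert_of_contains d _ hc, hg]
    exact pvISum_replace d.items k v c (by simpa [PySem.Dict.keys] using hnd) hmem
  · rw [PySem.Dict.items_insert_of_not_contains d _ (by simpa using hc),
      PySem.Dict.getD_of_not_contains d 0 (by simpa using hc), pvISum_append]
    simp
    try ring

lemma pvISum_step (d : PySem.Dict Int Int) (hnd : d.keys.Nodup) (ab : Int × Int) :
    pvISum ((pvStep d ab).items) = pvISum d.items + pvW ab.1 ab.2 := by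
  unfold pvStep pvW
  split_ifs with h1 h2 h3
  · ring
  · rw [show d.getD ab.1 0 - 1 = d.getD ab.1 0 + (-1) by ring,
      pvISum_insert d hnd ab.1 (-1)]
    ring
  · rw [show d.getD ab.1 0 + 1 = d.getD ab.1 0 + 1 by ring,
      pvISum_insert d hnd ab.1 1]
    ring
  · ring

lemma pvNodup_step (d : PySem.Dict Int Int) (hnd : d.keys.Nodup) (ab : Int × Int) :
    ((pvStep d ab).keys).Nodup := by
  unfold pvStep
  split_ifs <;> first
    | exact hnd
    | exact PySem.Dict.nodup_keys_insert _ _ _ hnd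

lemma pvISum_foldl (L : List (Int × Int)) :
    ∀ (d : PySem.Dict Int Int), d.keys.Nodup →
    pvISum ((L.foldl pvStep d).items) = pvISum d.items + pvWSum L := by
  induction L with
  | nil => intro d _; simp
  | cons ab t ih =>
    intro d hnd
    rw [List.foldl_cons, ih (pvStep d ab) (pvNodup_step d hnd ab), pvISum_step d hnd ab,
      pvWSum_cons]
    ring

-- ===== VERDICT (by name: the statement is the Claim_ definition above) =====
theorem calc_py_spec : Claim_equal_calc_py := by
  intro idata i _ hpre
  have hi : 1 ≤ i := hpre
  unfold Spec_calc_py calc_py calc_py_alt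
  have hd : pvISum (((pvPhaseIter idata i).foldl pvStep PySem.Dict.empty).items)
      = pvRunsum idata i (i - 1) := by
    rw [pvISum_foldl _ PySem.Dict.empty PySem.Dict.nodup_keys_empty]
    have : pvISum (PySem.Dict.empty : PySem.Dict Int Int).items = 0 := rfl
    rw [this, zero_add,
      pvPhaseIter_sum i hi idata.length idata le_rfl]
  have hb : pvLoopB (0 :: pvPrefix idata 0) (idata.length : Int) i (i - 1) 1 0
      = pvRunsum idata i (i - 1) := by
    rw [pvLoopB_eq idata i (by omega) ((idata.length : Int) - (i - 1)).toNat (i - 1)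
      le_rfl (by omega)]
    ring
  simp only []
  rw [hb, ← hd]
  rfl
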